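-- pv_equiv track=rewrite | github.com/starkware-libs/cairo-lang | src/starkware/cairo/common/cairo_keccak/keccak_utils.py | precompute_rc
-- ===== SOURCE A (Python) =====
-- from typing import Iterable, List, Optional
--
-- def precompute_rc(ell: int, rounds: Optional[int] = None) -> Iterable[int]:
--     x = 1
--     if rounds is None:
--         rounds = 12 + 2 * ell
--     for _ in range(rounds):
--         rc = 0
--         for m in range(ell + 1):
--             rc += (x & 1) << (2 ** m - 1)
--             x <<= 1
--             x ^= 0x171 * (x >> 8)
--         yield rc
-- ===== SOURCE B (Python) =====
-- def precompute_rc(ell: int, rounds=None):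
--     # The LFSR state is 8-bit (the xor clears the carried-out bit), so its output
--     # bit stream is periodic with period 255.  Precompute one period once, then
--     # pack each round constant by indexing the stream modulo 255; the bit weight
--     # 2**(2**m - 1) is maintained by the recurrence w -> 2*w*w.
--     if rounds is None:
--         rounds = 12 + 2 * ell
--     period = []
--     x = 1
--     for _ in range(255):
--         period.append(x & 1)
--         x = ((x << 1) ^ 0x71) & 0xFF if x & 0x80 else x << 1
--     t = 0
--     for _ in range(rounds):
--         rc = 0
--         w = 1
--         for _ in range(ell + 1):
--             rc += period[t % 255] * w
--             t += 1
--             w = 2 * w * w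
--         yield rc
-- ===== Notes on version B (the rewrite author's own statement) =====
-- stated objective: alternative
-- what changed: A clocks an unboundedly-shifting LFSR once per output bit, interleaved with packing; B exploits that the LFSR state is 8-bit and hence periodic with period 255: it precomputes one 255-bit period with a branch-form byte update, then packs each constant by indexing the stream modulo 255 with bit weights maintained by the recurrence w -> 2*w*w instead of 2**(2**m-1).
import Mathlib
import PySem

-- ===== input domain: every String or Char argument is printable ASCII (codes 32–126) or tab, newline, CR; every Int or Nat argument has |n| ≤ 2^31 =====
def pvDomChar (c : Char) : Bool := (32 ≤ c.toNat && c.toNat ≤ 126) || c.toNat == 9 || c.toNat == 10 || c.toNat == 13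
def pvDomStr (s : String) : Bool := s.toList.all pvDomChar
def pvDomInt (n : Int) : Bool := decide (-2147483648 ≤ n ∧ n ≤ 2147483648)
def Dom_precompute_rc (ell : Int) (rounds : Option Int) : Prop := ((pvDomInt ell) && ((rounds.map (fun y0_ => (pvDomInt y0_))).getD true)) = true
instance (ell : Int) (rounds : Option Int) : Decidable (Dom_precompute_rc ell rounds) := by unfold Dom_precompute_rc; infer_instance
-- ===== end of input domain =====

-- B exploits that the LFSR state stays 8-bit, hence its bit stream has period 255: it precomputes
-- one period once and packs constants by indexing the stream mod 255, with bit weights maintained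
-- by the recurrence w -> 2*w*w — an alternative algorithm (same asymptotic cost for the packing).


-- ===== PORT A =====
-- A's LFSR update, verbatim: x <<= 1; x ^= 0x171 * (x >> 8)
def pvStep (x : Int) : Int :=
  let y := x <<< 1
  PySem.Int.bxor y (0x171 * (y >>> 8))

-- literal port of A: a fold over range(rounds) carrying (yielded list, x), inner fold over
-- range(ell+1) carrying (rc, x).  m from range(ell+1) is ≥ 0, so 2**m is 2 ^ m.toNat, and the
-- shift amount 2**m - 1 (an int ≥ 0 in Python) is '<<< ((…).toNat : Int)' exactly.
def precompute_rc (ell : Int) (rounds : Option Int) : List Int :=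
  let r : Int := match rounds with | none => 12 + 2 * ell | some r => r
  ((PySem.List.pyRange 0 r 1).foldl (fun (s : List Int × Int) _ =>
      let inner := (PySem.List.pyRange 0 (ell + 1) 1).foldl (fun (p : Int × Int) m =>
          (p.1 + PySem.Int.band p.2 1 <<< (((2 : Int) ^ m.toNat - 1).toNat : Int), pvStep p.2))
        (0, s.2)
      (s.1 ++ [inner.1], inner.2)) ([], 1)).1

-- ===== PORT B =====
-- B's 8-bit LFSR update: ((x << 1) ^ 0x71) & 0xFF if x & 0x80 else x << 1
def pvStepB (x : Int) : Int :=
  if PySem.Int.band x 0x80 ≠ 0 then PySem.Int.band (PySem.Int.bxor (x <<< 1) 0x71) 0xFF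
  else x <<< 1

-- B's first loop: 255 clocks collecting x & 1 — one full period of the stream
def pvPeriodAux (x : Int) : Nat → List Int
  | 0 => []
  | k + 1 => PySem.Int.band x 1 :: pvPeriodAux (pvStepB x) k

-- literal port of B: period built once, then a fold over range(rounds) carrying (yielded, t),
-- inner fold over range(ell+1) carrying (rc, t, w) with rc += period[t % 255] * w; w = 2*w*w.
def precompute_rc_alt (ell : Int) (rounds : Option Int) : List Int :=
  let r : Int := rounds.getD (12 + 2 * ell)
  let period := pvPeriodAux 1 255
  ((PySem.List.pyRange 0 r 1).foldl (fun (s : List Int × Int) _ =>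
      let inner := (PySem.List.pyRange 0 (ell + 1) 1).foldl
        (fun (p : Int × Int × Int) _ =>
          (p.1 + PySem.List.pyGetD period (PySem.Int.mod p.2.1 255) 0 * p.2.2,
           p.2.1 + 1, 2 * p.2.2 * p.2.2)) (0, s.2, 1)
      (s.1 ++ [inner.1], inner.2.1)) ([], 0)).1

-- ===== PRECONDITION & SPEC =====
def Spec_precompute_rc (ell : Int) (rounds : Option Int) (out : List Int) : Prop := out = precompute_rc_alt ell rounds
instance (ell : Int) (rounds : Option Int) (out : List Int) : Decidable (Spec_precompute_rc ell rounds out) := by unfold Spec_precompute_rc; infer_instance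

-- ===== CLAIM (what is proved, stated in full; the proofs are below) =====
def Claim_equal_precompute_rc : Prop := ∀ (ell : Int) (rounds : Option Int), Dom_precompute_rc ell rounds → Spec_precompute_rc ell rounds (precompute_rc ell rounds)

-- ===== LEMMAS AND PROOFS =====

-- reference: the constant packed from the next c stream bits starting at state x
def pvRC (x : Int) (m : Nat) : Nat → Int
  | 0 => 0
  | c + 1 => PySem.Int.band x 1 <<< ((((2 : Int) ^ m - 1).toNat : Nat) : Int) + pvRC (pvStep x) (m + 1) c

-- reference: the list of r round constants of width n starting at state x
def pvRounds (x : Int) (n : Nat) : Nat → List Int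
  | 0 => []
  | r + 1 => pvRC x 0 n :: pvRounds (pvStep^[n] x) n r

-- ---- A side ----

theorem pvA_inner (c : Nat) :
    ∀ (a : Int), 0 ≤ a → ∀ (rc x : Int),
    (PySem.List.pyRange a (a + c) 1).foldl (fun (p : Int × Int) m =>
        (p.1 + PySem.Int.band p.2 1 <<< (((2 : Int) ^ m.toNat - 1).toNat : Int), pvStep p.2)) (rc, x)
      = (rc + pvRC x a.toNat c, pvStep^[c] x) := by
  induction c with
  | zero =>
    intro a _ rc x
    rw [PySem.List.pyRange_one_eq_nil (by omega)]
    simp [pvRC]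
  | succ c ih =>
    intro a ha rc x
    rw [PySem.List.pyRange_one_cons (by push_cast; omega)]
    simp only [List.foldl_cons]
    have hb : a + (↑(c + 1) : Int) = (a + 1) + ↑c := by push_cast; ring
    rw [hb, ih (a + 1) (by omega)]
    have hto : (a + 1).toNat = a.toNat + 1 := by omega
    rw [hto, Function.iterate_succ_apply]
    simp only [pvRC, Prod.mk.injEq]
    exact ⟨by ring, trivial⟩

theorem pvA_inner_clean (ell : Int) (rc x : Int) :
    (PySem.List.pyRange 0 (ell + 1) 1).foldl (fun (p : Int × Int) m =>
        (p.1 + PySem.Int.band p.2 1 <<< (((2 : Int) ^ m.toNat - 1).toNat : Int), pvStep p.2)) (rc, x)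
      = (rc + pvRC x 0 (ell + 1).toNat, pvStep^[(ell + 1).toNat] x) := by
  by_cases h : 0 ≤ ell + 1
  · have hb : (ell + 1 : Int) = (0 : Int) + ((ell + 1).toNat : Int) := by omega
    rw [hb, pvA_inner (ell + 1).toNat 0 le_rfl rc x]
    simp only [Int.toNat_zero, zero_add, Int.toNat_natCast]
  · have hz : (ell + 1).toNat = 0 := by omega
    rw [PySem.List.pyRange_one_eq_nil (by omega), hz]
    simp [pvRC]

theorem pvA_outer (ell : Int) (l : List Int) :
    ∀ (out : List Int) (x : Int),
    (l.foldl (fun (s : List Int × Int) _ =>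
      let inner := (PySem.List.pyRange 0 (ell + 1) 1).foldl (fun (p : Int × Int) m =>
          (p.1 + PySem.Int.band p.2 1 <<< (((2 : Int) ^ m.toNat - 1).toNat : Int), pvStep p.2))
        (0, s.2)
      (s.1 ++ [inner.1], inner.2)) (out, x))
      = (out ++ pvRounds x (ell + 1).toNat l.length, pvStep^[l.length * (ell + 1).toNat] x) := by
  induction l with
  | nil => intro out x; simp [pvRounds]
  | cons a l ih =>
    intro out x
    simp only [List.foldl_cons]
    rw [pvA_inner_clean ell 0 x, ih, ← Function.iterate_add_apply]
    simp only [Prod.mk.injEq, List.length_cons, pvRounds, zero_add, List.append_assoc,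
      List.singleton_append]
    refine ⟨trivial, ?_⟩
    congr 1
    ring

-- ---- B side ----

-- A's update agrees with B's 8-bit update on [0, 256) and preserves that interval
set_option maxRecDepth 100000 in
theorem pvPtwise : ∀ k : Fin 256,
    pvStepB (k : Int) = pvStep (k : Int) ∧ 0 ≤ pvStep (k : Int) ∧ pvStep (k : Int) < 256 := by
  decide

theorem pvIter_inv (k : Nat) :
    0 ≤ pvStep^[k] 1 ∧ pvStep^[k] 1 < 256 ∧ pvStepB^[k] 1 = pvStep^[k] 1 := by
  induction k with
  | zero => exact ⟨by norm_num, by norm_num, rfl⟩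
  | succ k ih =>
    obtain ⟨h0, h1, hB⟩ := ih
    have hf : ((⟨(pvStep^[k] 1).toNat, by omega⟩ : Fin 256) : Int) = pvStep^[k] 1 := by
      simp [Int.toNat_of_nonneg h0]
    obtain ⟨e, b0, b1⟩ := pvPtwise ⟨(pvStep^[k] 1).toNat, by omega⟩
    rw [hf] at e b0 b1
    refine ⟨?_, ?_, ?_⟩
    · rw [Function.iterate_succ_apply']; exact b0
    · rw [Function.iterate_succ_apply']; exact b1
    · rw [Function.iterate_succ_apply', Function.iterate_succ_apply', hB, e]

set_option maxRecDepth 100000 in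
theorem pvPeriod255 : pvStep^[255] 1 = 1 := by decide

theorem pvIter_mul (q : Nat) : pvStep^[255 * q] 1 = 1 := by
  induction q with
  | zero => rfl
  | succ q ih =>
    have h : 255 * (q + 1) = 255 * q + 255 := by ring
    rw [h, Function.iterate_add_apply, pvPeriod255, ih]

theorem pvIter_mod (t : Nat) : pvStep^[t] 1 = pvStep^[t % 255] 1 := by
  conv_lhs => rw [show t = t % 255 + 255 * (t / 255) by omega]
  rw [Function.iterate_add_apply, pvIter_mul]

theorem pvPeriodAux_length (x : Int) (k : Nat) : (pvPeriodAux x k).length = k := by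
  induction k generalizing x with
  | zero => rfl
  | succ k ih => simp [pvPeriodAux, ih]

theorem pvPeriodAux_getElem (T k : Nat) (x : Int) (h : k < T) :
    (pvPeriodAux x T)[k]'(by rw [pvPeriodAux_length]; exact h)
      = PySem.Int.band (pvStepB^[k] x) 1 := by
  induction T generalizing k x with
  | zero => omega
  | succ T ih =>
    cases k with
    | zero => simp [pvPeriodAux]
    | succ k =>
      simp only [pvPeriodAux, List.getElem_cons_succ]
      rw [ih k (pvStepB x) (by omega), Function.iterate_succ_apply]

-- the stream bit B reads at time t is the bit A's LFSR emits at its t-th clock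
theorem pvIndex (t : Int) (ht : 0 ≤ t) :
    PySem.List.pyGetD (pvPeriodAux 1 255) (PySem.Int.mod t 255) 0
      = PySem.Int.band (pvStep^[t.toNat] 1) 1 := by
  have hm : PySem.Int.mod t 255 = ((t.toNat % 255 : Nat) : Int) := by
    rw [PySem.Int.mod_eq_emod_of_pos (by norm_num : (0 : Int) < 255)]
    omega
  rw [hm, PySem.List.pyGetD_natCast]
  have hlt : t.toNat % 255 < 255 := Nat.mod_lt _ (by norm_num)
  rw [List.getD_eq_getElem _ _ (by rw [pvPeriodAux_length]; exact hlt)]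
  rw [pvPeriodAux_getElem 255 (t.toNat % 255) 1 hlt,
     (pvIter_inv (t.toNat % 255)).2.2, ← pvIter_mod t.toNat]

-- the weight recurrence generates the powers 2^(2^m - 1)
theorem pvWeight (m : Nat) :
    (2 : Int) * 2 ^ (2 ^ m - 1) * 2 ^ (2 ^ m - 1) = 2 ^ (2 ^ (m + 1) - 1) := by
  have h1 : 1 ≤ 2 ^ m := Nat.one_le_two_pow
  have h2 : 2 ^ (m + 1) - 1 = 1 + (2 ^ m - 1) + (2 ^ m - 1) := by
    have : 2 ^ (m + 1) = 2 ^ m + 2 ^ m := by rw [pow_succ]; ring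
    omega
  rw [h2, pow_add, pow_add, pow_one]

theorem pvShl (a : Int) (m : Nat) :
    a <<< (((((2 : Int) ^ m - 1).toNat : Nat)) : Int) = a * 2 ^ (2 ^ m - 1) := by
  have hc : ((2 : Int) ^ m - 1).toNat = 2 ^ m - 1 := by
    have h : (2 : Int) ^ m = ((2 ^ m : Nat) : Int) := by push_cast; ring
    rw [h]; omega
  rw [hc, Int.shiftLeft_eq_mul_pow]
  push_cast; ring

-- B's inner-loop body as a function of the carried state only (the range element is ignored)
def pvBStep (p : Int × Int × Int) : Int × Int × Int :=
  (p.1 + PySem.List.pyGetD (pvPeriodAux 1 255) (PySem.Int.mod p.2.1 255) 0 * p.2.2,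
   p.2.1 + 1, 2 * p.2.2 * p.2.2)

theorem pvLam_eq :
    (fun (p : Int × Int × Int) (_ : Int) =>
      (p.1 + PySem.List.pyGetD (pvPeriodAux 1 255) (PySem.Int.mod p.2.1 255) 0 * p.2.2,
       p.2.1 + 1, 2 * p.2.2 * p.2.2)) = fun b _ => pvBStep b := rfl

theorem pvFoldl_const {α β : Type} (f : β → β) :
    ∀ (L : List α) (s : β), L.foldl (fun b _ => f b) s = f^[L.length] s := by
  intro L
  induction L with
  | nil => intro s; rfl
  | cons a L ih =>
    intro s
    simp only [List.foldl_cons, List.length_cons, ih, Function.iterate_succ_apply]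

theorem pvB_iter (c : Nat) :
    ∀ (m : Nat) (rc t w : Int), 0 ≤ t → w = 2 ^ (2 ^ m - 1) →
    pvBStep^[c] (rc, t, w)
      = (rc + pvRC (pvStep^[t.toNat] 1) m c, t + c, 2 ^ (2 ^ (m + c) - 1)) := by
  induction c with
  | zero =>
    intro m rc t w _ hw
    simp [pvRC, hw]
  | succ c ih =>
    intro m rc t w ht hw
    rw [Function.iterate_succ_apply]
    have hb : pvBStep (rc, t, w)
        = (rc + PySem.Int.band (pvStep^[t.toNat] 1) 1 * 2 ^ (2 ^ m - 1), t + 1,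
           2 * w * w) := by
      simp only [pvBStep, pvIndex t ht, hw]
    rw [hb, ih (m + 1) _ (t + 1) _ (by omega) (by rw [hw, pvWeight])]
    have h1 : (t + 1).toNat = t.toNat + 1 := by omega
    rw [h1, Function.iterate_succ_apply']
    simp only [pvRC, Prod.mk.injEq]
    refine ⟨?_, by push_cast; ring, by rw [show m + 1 + c = m + (c + 1) by ring]⟩
    rw [pvShl]
    ring

theorem pvB_inner_clean (ell : Int) (t : Int) (ht : 0 ≤ t) :
    (PySem.List.pyRange 0 (ell + 1) 1).foldl
      (fun (p : Int × Int × Int) (_ : Int) =>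
        (p.1 + PySem.List.pyGetD (pvPeriodAux 1 255) (PySem.Int.mod p.2.1 255) 0 * p.2.2,
         p.2.1 + 1, 2 * p.2.2 * p.2.2)) (0, t, 1)
      = ((pvRC (pvStep^[t.toNat] 1) 0 (ell + 1).toNat : Int), t + ((ell + 1).toNat : Int),
         2 ^ (2 ^ (0 + (ell + 1).toNat) - 1)) := by
  rw [pvLam_eq, pvFoldl_const, PySem.List.length_pyRange_one, Int.sub_zero]
  rw [pvB_iter (ell + 1).toNat 0 0 t 1 ht (by norm_num)]
  simp

theorem pvB_outer (ell : Int) (l : List Int) :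
    ∀ (out : List Int) (t : Int), 0 ≤ t →
    (l.foldl (fun (s : List Int × Int) _ =>
      let inner := (PySem.List.pyRange 0 (ell + 1) 1).foldl
        (fun (p : Int × Int × Int) _ =>
          (p.1 + PySem.List.pyGetD (pvPeriodAux 1 255) (PySem.Int.mod p.2.1 255) 0 * p.2.2,
           p.2.1 + 1, 2 * p.2.2 * p.2.2)) (0, s.2, 1)
      (s.1 ++ [inner.1], inner.2.1)) (out, t))
      = (out ++ pvRounds (pvStep^[t.toNat] 1) (ell + 1).toNat l.length,
         t + l.length * ((ell + 1).toNat : Int)) := by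
  induction l with
  | nil => intro out t _; simp [pvRounds]
  | cons a l ih =>
    intro out t ht
    simp only [List.foldl_cons]
    rw [pvB_inner_clean ell t ht]
    simp only
    rw [ih _ (t + ((ell + 1).toNat : Int)) (by omega)]
    have hT : (t + ((ell + 1).toNat : Int)).toNat = (ell + 1).toNat + t.toNat := by omega
    rw [hT, Function.iterate_add_apply]
    simp only [Prod.mk.injEq, List.length_cons, pvRounds, List.append_assoc,
      List.singleton_append]
    exact ⟨trivial, by push_cast; ring⟩

-- ---- main ----

theorem pvMain (ell r : Int) :
    precompute_rc ell (some r) = precompute_rc_alt ell (some r) := by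
  unfold precompute_rc precompute_rc_alt
  dsimp only [Option.getD_some]
  rw [pvA_outer ell (PySem.List.pyRange 0 r 1) [] 1,
      pvB_outer ell (PySem.List.pyRange 0 r 1) [] 0 le_rfl]
  simp

-- ===== VERDICT (by name: the statement is the Claim_ definition above) =====
theorem precompute_rc_spec : Claim_equal_precompute_rc := by
  intro ell rounds _
  cases rounds with
  | none => exact pvMain ell (12 + 2 * ell)
  | some r => exact pvMain ell r
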